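-- pv_equiv track=rewrite | github.com/omar1slam/Code-Wars | Lonliness of One.py | loneliest
-- ===== SOURCE A (Python) =====
-- def loneliest(number):
--     minLon = 50
--     lng = str(number)
--     store = []
--     for i in range(len(lng)):
--         x = i - int(lng[i])
--         y = i + int(lng[i]) + 1
--         if x < 0:
--             x = 0
--         if y > (len(lng)):
--             y = len(lng)
--         temp = lng[x:y]
--         lon = sum(int(digit) for digit in temp) - int(lng[i])
--         if lon <= minLon:
--             minLon = lon
--             if int(lng[i]) == 1:
--                 store.append(lon)
--
--     if len(store)!=0:
--         store = sorted(store)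
--         if store[0] == minLon:
--             return True
--         else:
--             return False
--     else:
--         return False
-- ===== SOURCE B (Python) =====
-- def loneliest(number):
--     lng = str(number)
--     n = len(lng)
--     digits = [int(c) for c in lng]
--     lon = []
--     for i, d in enumerate(digits):
--         x = max(0, i - d)
--         y = min(n, i + d + 1)
--         lon.append(sum(digits[x:y]) - d)
--     m = min(lon)
--     return any(d == 1 and lon[i] == m for i, d in enumerate(digits))
-- ===== Notes on version B (the rewrite author's own statement) =====
-- stated objective: simpler
-- what changed: Replaces A's interleaved running-minimum with conditional appends into a later-sorted store by a plain three-phase computation: build the per-position window-sum table, take its minimum, and test whether a digit-1 position attains it.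
import Mathlib
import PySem

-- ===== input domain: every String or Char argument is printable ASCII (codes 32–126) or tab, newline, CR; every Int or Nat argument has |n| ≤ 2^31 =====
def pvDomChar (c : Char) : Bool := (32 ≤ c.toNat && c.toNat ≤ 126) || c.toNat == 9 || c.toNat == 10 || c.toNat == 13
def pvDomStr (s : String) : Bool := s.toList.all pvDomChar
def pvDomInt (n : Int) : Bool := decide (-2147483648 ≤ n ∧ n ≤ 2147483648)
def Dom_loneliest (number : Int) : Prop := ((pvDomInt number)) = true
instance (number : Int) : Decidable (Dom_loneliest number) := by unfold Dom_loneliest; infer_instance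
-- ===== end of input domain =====

-- B replaces A's interleaved running-minimum/store/sort bookkeeping by a plain
-- three-phase computation (window-sum table, global minimum, membership test) — objective: simpler.


-- int(c) for a single character c; under Pre_ every character of str(number) is a digit,
-- so the default 0 is never used
def pvInt1 (c : Char) : Int := (PySem.Int.ofChars? [c]).getD 0

-- ===== PORT A =====
-- one iteration of A's 'for i in range(len(lng))' loop over the state (minLon, store)
def pvStepA (lng : List Char) (n : Int) (acc : Int × List Int) (i : Int) : Int × List Int :=
  let di := pvInt1 (PySem.List.pyGetD lng i ' ')
  let x0 := i - di
  let y0 := i + di + 1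
  let x := if x0 < 0 then 0 else x0
  let y := if y0 > n then n else y0
  let temp := PySem.List.slice lng (some x) (some y)
  let lon := (temp.foldl (fun s c => s + pvInt1 c) 0) - di
  if lon ≤ acc.1 then (lon, if di == 1 then acc.2 ++ [lon] else acc.2) else acc

-- A's body after lng = str(number)
def pvRunA (lng : List Char) : Bool :=
  let n : Int := lng.length
  let res := (PySem.List.pyRange 0 n 1).foldl (pvStepA lng n) (50, [])
  if res.2.length != 0 then
    let store := PySem.List.sorted res.2 (fun x => x) false
    if PySem.List.pyGetD store 0 0 == res.1 then true else false
  else false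

def loneliest (number : Int) : Bool := pvRunA (PySem.Int.toChars number)

-- ===== PORT B =====
-- B's body after lng = str(number)
def pvRunB (lng : List Char) : Bool :=
  let n : Int := lng.length
  let digits := lng.map pvInt1
  let lon := (PySem.List.enumerate digits 0).map (fun p =>
      let x := max 0 (p.1 - p.2)
      let y := min n (p.1 + p.2 + 1)
      (PySem.List.slice digits (some x) (some y)).foldl (· + ·) 0 - p.2)
  let m := (PySem.List.min? lon (fun v => v)).getD 0
  (PySem.List.enumerate digits 0).any (fun p => p.2 == 1 && PySem.List.pyGetD lon p.1 0 == m)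

def loneliest_alt (number : Int) : Bool := pvRunB (PySem.Int.toChars number)

-- ===== PRECONDITION & SPEC =====
-- A raises ValueError on every negative number (int('-') on the sign character); Pre_ excludes exactly those.
def Pre_loneliest (number : Int) : Prop := 0 ≤ number
instance (number : Int) : Decidable (Pre_loneliest number) := by unfold Pre_loneliest; infer_instance
def pvWitness_loneliest : Int := (101)

def Spec_loneliest (number : Int) (out : Bool) : Prop := out = loneliest_alt number
instance (number : Int) (out : Bool) : Decidable (Spec_loneliest number out) := by unfold Spec_loneliest; infer_instance

-- ===== CLAIM (what is proved, stated in full; the proofs are below) =====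
def Claim_equal_loneliest : Prop := ∀ (number : Int), Dom_loneliest number → Pre_loneliest number → Spec_loneliest number (loneliest number)

-- ===== LEMMAS AND PROOFS =====

-- characters: a digit character is one of '0'..'9', and pvInt1 of it lies in [0, 9]
theorem pv_char_eq_of_toNat (c : Char) (d : Char) (h : c.toNat = d.toNat) : c = d := by
  apply Char.ext
  exact UInt32.toNat_inj.mp h

theorem pv_char_digit_cases (c : Char) (h : c.isDigit = true) :
    c ∈ ['0','1','2','3','4','5','6','7','8','9'] := by
  simp [Char.isDigit, UInt32.le_iff_toNat_le] at h
  obtain ⟨h1, h2⟩ := h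
  have h1' : 48 ≤ c.toNat := by simpa using h1
  have h2' : c.toNat ≤ 57 := by simpa using h2
  interval_cases hv : c.toNat <;> simp only [List.mem_cons, List.not_mem_nil, or_false] <;>
    [ exact Or.inl (pv_char_eq_of_toNat c '0' (by rw [hv]; rfl));
      exact Or.inr (Or.inl (pv_char_eq_of_toNat c '1' (by rw [hv]; rfl)));
      exact Or.inr (Or.inr (Or.inl (pv_char_eq_of_toNat c '2' (by rw [hv]; rfl))));
      exact Or.inr (Or.inr (Or.inr (Or.inl (pv_char_eq_of_toNat c '3' (by rw [hv]; rfl)))));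
      exact Or.inr (Or.inr (Or.inr (Or.inr (Or.inl (pv_char_eq_of_toNat c '4' (by rw [hv]; rfl))))));
      exact Or.inr (Or.inr (Or.inr (Or.inr (Or.inr (Or.inl (pv_char_eq_of_toNat c '5' (by rw [hv]; rfl)))))));
      exact Or.inr (Or.inr (Or.inr (Or.inr (Or.inr (Or.inr (Or.inl (pv_char_eq_of_toNat c '6' (by rw [hv]; rfl))))))));
      exact Or.inr (Or.inr (Or.inr (Or.inr (Or.inr (Or.inr (Or.inr (Or.inl (pv_char_eq_of_toNat c '7' (by rw [hv]; rfl)))))))));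
      exact Or.inr (Or.inr (Or.inr (Or.inr (Or.inr (Or.inr (Or.inr (Or.inr (Or.inl (pv_char_eq_of_toNat c '8' (by rw [hv]; rfl))))))))));
      exact Or.inr (Or.inr (Or.inr (Or.inr (Or.inr (Or.inr (Or.inr (Or.inr (Or.inr (pv_char_eq_of_toNat c '9' (by rw [hv]; rfl))))))))))]

theorem pvInt1_bounds (c : Char) (h : c.isDigit = true) : 0 ≤ pvInt1 c ∧ pvInt1 c ≤ 9 := by
  have hm := pv_char_digit_cases c h
  fin_cases hm <;> decide

theorem pv_toChars_digits (n : Int) (hn : 0 ≤ n) :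
    ∀ c ∈ PySem.Int.toChars n, c.isDigit = true := by
  intro c hc
  simp only [PySem.Int.toChars, if_neg (not_lt.mpr hn)] at hc
  exact Nat.isDigit_of_mem_toDigits (by norm_num) (by norm_num) hc

-- the per-position loneliness value and its table
def pvLon (ds : List Int) (i d : Int) : Int :=
  (PySem.List.slice ds (some (max 0 (i - d))) (some (min (ds.length : Int) (i + d + 1)))).foldl (· + ·) 0 - d

def pvLons (ds : List Int) : List Int :=
  (List.range ds.length).map (fun (k : Nat) => pvLon ds (k : Int) (ds.getD k 0))

def pvMinTo (ds : List Int) (k : Nat) : Int := ((pvLons ds).take k).foldl min 50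

theorem pvLons_length (ds : List Int) : (pvLons ds).length = ds.length := by
  simp [pvLons]

-- generic foldl-min facts
theorem pv_foldl_min_le_init (l : List Int) (a : Int) : l.foldl min a ≤ a := by
  induction l generalizing a with
  | nil => simp
  | cons x t ih => exact le_trans (ih (min a x)) (min_le_left a x)

theorem pv_foldl_min_le_mem (l : List Int) (a v : Int) (hv : v ∈ l) : l.foldl min a ≤ v := by
  induction l generalizing a with
  | nil => simp at hv
  | cons x t ih =>
    rw [List.foldl_cons]
    rcases List.mem_cons.mp hv with h | h
    · rw [h]; exact le_trans (pv_foldl_min_le_init t (min a x)) (min_le_right a x)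
    · exact ih (min a x) h

theorem pv_foldl_min_cases (l : List Int) (a : Int) : l.foldl min a = a ∨ l.foldl min a ∈ l := by
  induction l generalizing a with
  | nil => simp
  | cons x t ih =>
    rcases ih (min a x) with h | h
    · rcases le_total a x with hax | hax
      · left; simpa [min_eq_left hax] using h
      · right; rw [List.foldl_cons, h, min_eq_right hax]; exact List.mem_cons_self
    · right; exact List.mem_cons_of_mem x h

-- slice commutes with map for nonnegative bounds
theorem pv_slice_map (cs : List Char) (a b : Int) (ha : 0 ≤ a) (hb : 0 ≤ b) :
    PySem.List.slice (cs.map pvInt1) (some a) (some b) = (PySem.List.slice cs (some a) (some b)).map pvInt1 := by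
  rw [PySem.List.slice_toNat _ ha hb, PySem.List.slice_toNat _ ha hb, List.map_take, List.map_drop]

-- sum bound: a window of at most 3 digits ≤ 9, minus 1, stays below the initial 50
theorem pv_sum_le (l : List Int) : ∀ (a : Int), (∀ v ∈ l, v ≤ 9) → l.foldl (· + ·) a ≤ a + 9 * (l.length : Int) := by
  induction l with
  | nil => intro a _; simp
  | cons x t ih =>
    intro a h9
    rw [List.foldl_cons]
    have ht := ih (a + x) (fun v hv => h9 v (List.mem_cons_of_mem x hv))
    have hx : x ≤ 9 := h9 x List.mem_cons_self
    simp only [List.length_cons]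
    push_cast
    push_cast at ht
    omega

theorem pvLon_one_le (ds : List Int) (h9 : ∀ v ∈ ds, v ≤ 9) (i : Int) (hi : 0 ≤ i) :
    pvLon ds i 1 ≤ 50 := by
  unfold pvLon
  have ha : (0:Int) ≤ max 0 (i - 1) := le_max_left _ _
  have hb : (0:Int) ≤ min (ds.length : Int) (i + 1 + 1) := le_min (by positivity) (by omega)
  rw [PySem.List.slice_toNat _ ha hb]
  set t := List.take ((min (ds.length : Int) (i + 1 + 1)).toNat - (max 0 (i - 1)).toNat)
      (List.drop (max 0 (i - 1)).toNat ds) with ht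
  have hlen : t.length ≤ 3 := by
    have h1 := List.length_take (l := List.drop (max 0 (i - 1)).toNat ds)
      (i := (min (ds.length : Int) (i + 1 + 1)).toNat - (max 0 (i - 1)).toNat)
    rw [← ht] at h1
    have h2 : ((min (ds.length : Int) (i + 1 + 1)).toNat : Int) ≤ i + 2 := by
      have := min_le_right (ds.length : Int) (i + 1 + 1)
      omega
    have h3 : (i - 1 : Int) ≤ ((max 0 (i - 1)).toNat : Int) := by
      have := le_max_right (0 : Int) (i - 1)
      omega
    omega
  have hmem : ∀ v ∈ t, v ≤ 9 := fun v hv =>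
    h9 v (List.mem_of_mem_drop (List.mem_of_mem_take hv))
  have hs := pv_sum_le t 0 hmem
  have hl3 : ((t.length : Nat) : Int) ≤ 3 := by exact_mod_cast hlen
  omega

-- A's loop step in terms of the table value
theorem pvStepA_eq (cs : List Char) (hd : ∀ c ∈ cs, c.isDigit = true)
    (acc : Int × List Int) (k : Nat) (hk : k < cs.length) :
    pvStepA cs (cs.length : Int) acc (k : Int) =
      (let d := (cs.map pvInt1).getD k 0
       let lon := pvLon (cs.map pvInt1) (k : Int) d
       if lon ≤ acc.1 then (lon, if d == 1 then acc.2 ++ [lon] else acc.2) else acc) := by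
  have hgd : (cs.map pvInt1).getD k 0 = pvInt1 cs[k] := by
    rw [List.getD_eq_getElem (cs.map pvInt1) 0 (by simpa using hk), List.getElem_map]
  have hpy : PySem.List.pyGetD cs (k : Int) ' ' = cs[k] := by
    rw [PySem.List.pyGetD_natCast, List.getD_eq_getElem cs ' ' hk]
  have hdk : 0 ≤ pvInt1 cs[k] := (pvInt1_bounds _ (hd _ (List.getElem_mem hk))).1
  unfold pvStepA
  simp only [hpy, hgd]
  set d := pvInt1 cs[k] with hdd
  have hx : (if (k : Int) - d < 0 then 0 else (k : Int) - d) = max 0 ((k : Int) - d) := by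
    rcases lt_or_ge ((k : Int) - d) 0 with h | h
    · rw [if_pos h, max_eq_left (le_of_lt h)]
    · rw [if_neg (not_lt.mpr h), max_eq_right h]
  have hy : (if (k : Int) + d + 1 > (cs.length : Int) then (cs.length : Int) else (k : Int) + d + 1)
      = min (cs.length : Int) ((k : Int) + d + 1) := by
    rcases lt_or_ge ((cs.length : Int)) ((k : Int) + d + 1) with h | h
    · rw [if_pos h, min_eq_left (le_of_lt h)]
    · rw [if_neg (not_lt.mpr h), min_eq_right h]
  rw [hx, hy]
  unfold pvLon
  have hlen : ((cs.map pvInt1).length : Int) = (cs.length : Int) := by simp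
  rw [hlen]
  rw [pv_slice_map cs _ _ (le_max_left _ _) (le_min (by positivity) (by omega))]
  rw [← List.foldl_map]

theorem pvMinTo_succ (ds : List Int) (k : Nat) (hk : k < ds.length) :
    pvMinTo ds (k+1) = min (pvMinTo ds k) ((pvLons ds).getD k 0) := by
  unfold pvMinTo
  have hk' : k < (pvLons ds).length := by rw [pvLons_length]; exact hk
  rw [List.take_add_one, List.getElem?_eq_getElem hk']
  rw [List.getD_eq_getElem?_getD, List.getElem?_eq_getElem hk']
  rw [List.foldl_append]
  rfl

-- the loop invariant of A's fold
theorem pvFoldA_inv (cs : List Char) (hd : ∀ c ∈ cs, c.isDigit = true) (k : Nat) (hk : k ≤ cs.length) :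
    ((List.range k).foldl (fun acc (j : Nat) => pvStepA cs (cs.length : Int) acc (j : Int)) (50, ([] : List Int))).1
        = pvMinTo (cs.map pvInt1) k ∧
    (∀ v ∈ ((List.range k).foldl (fun acc (j : Nat) => pvStepA cs (cs.length : Int) acc (j : Int)) (50, ([] : List Int))).2,
        ∃ j, j < k ∧ (cs.map pvInt1).getD j 0 = 1 ∧ (pvLons (cs.map pvInt1)).getD j 0 = v) ∧
    (∀ j, j < k → (cs.map pvInt1).getD j 0 = 1 →
        (pvLons (cs.map pvInt1)).getD j 0 ≤ pvMinTo (cs.map pvInt1) j →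
        (pvLons (cs.map pvInt1)).getD j 0 ∈
          ((List.range k).foldl (fun acc (j : Nat) => pvStepA cs (cs.length : Int) acc (j : Int)) (50, ([] : List Int))).2) := by
  induction k with
  | zero => refine ⟨by simp [pvMinTo], by simp, by simp⟩
  | succ k ih =>
    have hk' : k < cs.length := Nat.lt_of_succ_le hk
    obtain ⟨ih1, ih2, ih3⟩ := ih (Nat.le_of_lt hk')
    set ds := cs.map pvInt1 with hds
    set r := (List.range k).foldl (fun acc (j : Nat) => pvStepA cs (cs.length : Int) acc (j : Int))
      (50, ([] : List Int)) with hr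
    have hdl : ds.length = cs.length := by simp [hds]
    have hkd : k < ds.length := by omega
    have hLk : (pvLons ds).getD k 0 = pvLon ds (k : Int) (ds.getD k 0) := by
      unfold pvLons
      exact PySem.List.getD_map_range _ _ _ _ hkd
    have hstep : (List.range (k+1)).foldl (fun acc (j : Nat) => pvStepA cs (cs.length : Int) acc (j : Int))
        (50, ([] : List Int))
        = (let d := ds.getD k 0
           let lon := pvLon ds (k : Int) d
           if lon ≤ r.1 then (lon, if d == 1 then r.2 ++ [lon] else r.2) else r) := by
      rw [List.range_succ, List.foldl_append, List.foldl_cons, List.foldl_nil, ← hr,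
        pvStepA_eq cs hd r k hk']
    rw [hstep]
    dsimp only
    rw [← hLk]
    set L := pvLons ds with hL
    set lonk := L.getD k 0 with hlonk
    have hmsucc : pvMinTo ds (k+1) = min (pvMinTo ds k) lonk := pvMinTo_succ ds k hkd
    by_cases hle : lonk ≤ r.1
    · rw [if_pos hle]
      refine ⟨?_, ?_, ?_⟩
      · rw [hmsucc, ih1] at *
        omega
      · intro v hv
        by_cases hone : ds.getD k 0 == 1
        · rw [if_pos hone] at hv
          rcases List.mem_append.mp hv with h | h
          · obtain ⟨j, hj, hj1, hj2⟩ := ih2 v h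
            exact ⟨j, Nat.lt_succ_of_lt hj, hj1, hj2⟩
          · exact ⟨k, Nat.lt_succ_self k, beq_iff_eq.mp hone, (List.mem_singleton.mp h).symm⟩
        · rw [if_neg hone] at hv
          obtain ⟨j, hj, hj1, hj2⟩ := ih2 v hv
          exact ⟨j, Nat.lt_succ_of_lt hj, hj1, hj2⟩
      · intro j hj hj1 hj2
        rcases Nat.lt_succ_iff_lt_or_eq.mp hj with h | h
        · have := ih3 j h hj1 hj2
          by_cases hone : ds.getD k 0 == 1
          · rw [if_pos hone]; exact List.mem_append_left _ this
          · rw [if_neg hone]; exact this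
        · subst h
          have hone : ds.getD j 0 == 1 := beq_iff_eq.mpr hj1
          rw [if_pos hone]
          exact List.mem_append_right _ (List.mem_singleton.mpr rfl)
    · rw [if_neg hle]
      refine ⟨?_, ?_, ?_⟩
      · rw [hmsucc, ih1] at *
        omega
      · intro v hv
        obtain ⟨j, hj, hj1, hj2⟩ := ih2 v hv
        exact ⟨j, Nat.lt_succ_of_lt hj, hj1, hj2⟩
      · intro j hj hj1 hj2
        rcases Nat.lt_succ_iff_lt_or_eq.mp hj with h | h
        · exact ih3 j h hj1 hj2
        · subst h
          exfalso
          exact hle (le_trans hj2 (by rw [ih1]))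

-- the central equivalence on any all-digit character list
-- the global capped minimum is below every prefix minimum
theorem pvMinTo_global_le (ds : List Int) (k : Nat) :
    pvMinTo ds ds.length ≤ pvMinTo ds k := by
  rcases le_or_gt k ds.length with hk | hk
  · unfold pvMinTo
    rw [show (pvLons ds).take ds.length = pvLons ds by
        apply List.take_of_length_le; rw [pvLons_length]]
    conv_lhs => rw [← List.take_append_drop k (pvLons ds)]
    rw [List.foldl_append]
    exact pv_foldl_min_le_init _ _
  · unfold pvMinTo
    rw [show (pvLons ds).take k = pvLons ds by
        apply List.take_of_length_le; rw [pvLons_length]; omega]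
    rw [show (pvLons ds).take ds.length = pvLons ds by
        apply List.take_of_length_le; rw [pvLons_length]]

-- elements of the table are elements of the list, as getD values
theorem pvLons_getD_mem (ds : List Int) (j : Nat) (hj : j < ds.length) :
    (pvLons ds).getD j 0 ∈ pvLons ds := by
  have hj' : j < (pvLons ds).length := by rw [pvLons_length]; exact hj
  rw [List.getD_eq_getElem _ _ hj']
  exact List.getElem_mem hj'

theorem pv_equiv (cs : List Char) (hd : ∀ c ∈ cs, c.isDigit = true) : pvRunA cs = pvRunB cs := by
  set ds := cs.map pvInt1 with hds
  have h9 : ∀ v ∈ ds, v ≤ 9 := by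
    intro v hv
    obtain ⟨c, hc, rfl⟩ := List.mem_map.mp hv
    exact (pvInt1_bounds c (hd c hc)).2
  have hdl : ds.length = cs.length := by simp [hds]
  set L := pvLons ds with hL
  have hLlen : L.length = cs.length := by rw [hL, pvLons_length, hdl]
  -- the A side reduces to a foldl over List.range
  have hA : pvRunA cs =
      (let r := (List.range cs.length).foldl
          (fun acc (j : Nat) => pvStepA cs (cs.length : Int) acc (j : Int)) (50, ([] : List Int))
       if r.2.length != 0 then
         (if PySem.List.pyGetD (PySem.List.sorted r.2 (fun x => x) false) 0 0 == r.1 then true else false)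
       else false) := by
    unfold pvRunA
    simp only [PySem.List.pyRange_zero_natCast, List.foldl_map]
  -- the B side: its table is pvLons ds
  have hlon : (PySem.List.enumerate ds 0).map (fun p =>
        (PySem.List.slice ds (some (max 0 (p.1 - p.2))) (some (min ((cs.length : Nat) : Int) (p.1 + p.2 + 1)))).foldl (· + ·) 0 - p.2)
      = L := by
    rw [PySem.List.enumerate_eq_map_pyRange ds 0, List.map_map]
    rw [show PySem.List.len ds = ((ds.length : Nat) : Int) from by simp [PySem.List.len]]
    rw [hdl, PySem.List.pyRange_zero_natCast, List.map_map]
    rw [hL]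
    unfold pvLons
    rw [hdl]
    apply List.map_congr_left
    intro k hk
    simp only [Function.comp]
    rw [PySem.List.pyGetD_natCast]
    unfold pvLon
    rw [hdl]
  have hB : pvRunB cs = (PySem.List.enumerate ds 0).any
      (fun p => p.2 == 1 && PySem.List.pyGetD L p.1 0 == (PySem.List.min? L (fun v => v)).getD 0) := by
    unfold pvRunB
    rw [← hds]
    simp only [hlon]
  by_cases hcs : cs.length = 0
  · have : cs = [] := List.eq_nil_of_length_eq_zero hcs
    subst this
    decide
  rw [hA, hB]
  -- nonempty string
  have hLne : L ≠ [] := by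
    intro h
    rw [h] at hLlen
    simp at hLlen
    omega
  obtain ⟨h1, h2, h3⟩ := pvFoldA_inv cs hd cs.length le_rfl
  set r := (List.range cs.length).foldl
      (fun acc (j : Nat) => pvStepA cs (cs.length : Int) acc (j : Int)) (50, ([] : List Int)) with hr
  cases hmin : PySem.List.min? L (fun v => v) with
  | none => exact absurd ((PySem.List.min?_eq_none_iff L _).mp hmin) hLne
  | some m =>
  simp only [Option.getD_some]
  have hm_mem : m ∈ L := PySem.List.min?_mem hmin
  have hm_min : ∀ y ∈ L, m ≤ y := PySem.List.min?_isMin hmin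
  have hG : pvMinTo ds cs.length = L.foldl min 50 := by
    unfold pvMinTo
    rw [← hdl]
    rw [show (pvLons ds).take ds.length = pvLons ds from
      List.take_of_length_le (le_of_eq (pvLons_length ds))]
  have hGm : L.foldl min 50 ≤ m := pv_foldl_min_le_mem L 50 m hm_mem
  have hglob : ∀ k : Nat, pvMinTo ds cs.length ≤ pvMinTo ds k := by
    intro k
    have := pvMinTo_global_le ds k
    rw [hdl] at this
    exact this
  have hLk_eq : ∀ k : Nat, k < cs.length → L.getD k 0 = pvLon ds (k : Int) (ds.getD k 0) := by
    intro k hk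
    rw [hL]
    unfold pvLons
    exact PySem.List.getD_map_range _ _ _ _ (by omega)
  rw [Bool.eq_iff_iff]
  constructor
  · -- A returns True → B returns True
    intro hAt
    by_cases hne : (r.2.length != 0) = true
    swap
    · rw [if_neg hne] at hAt; exact absurd hAt (by simp)
    rw [if_pos hne] at hAt
    by_cases hhead : (PySem.List.pyGetD (PySem.List.sorted r.2 (fun x => x) false) 0 0 == r.1) = true
    swap
    · rw [if_neg hhead] at hAt; exact absurd hAt (by simp)
    have hr2ne : r.2 ≠ [] := by
      intro h; rw [h] at hne; simp at hne
    have hSne : PySem.List.sorted r.2 (fun x => x) false ≠ [] := by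
      rw [Ne, PySem.List.sorted_eq_nil_iff]; exact hr2ne
    obtain ⟨h0S, tS, hScons⟩ := List.exists_cons_of_ne_nil hSne
    have hh0 : PySem.List.pyGetD (PySem.List.sorted r.2 (fun x => x) false) 0 0 = h0S := by
      rw [hScons]; exact PySem.List.pyGetD_zero_cons _ _ _
    have hh0r : h0S = r.1 := by
      rw [hh0] at hhead; exact beq_iff_eq.mp hhead
    have hh0mem : h0S ∈ r.2 := by
      rw [← PySem.List.mem_sorted r.2 (fun x => x) false, hScons]; exact List.mem_cons_self
    obtain ⟨j, hj, hj1, hj2⟩ := h2 h0S hh0mem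
    have hjL : L.getD j 0 ∈ L := by rw [hL]; exact pvLons_getD_mem ds j (by omega)
    have hLjm : L.getD j 0 = m := by
      have h1' : L.getD j 0 = pvMinTo ds cs.length := by rw [hj2, hh0r, h1]
      have hle1 : m ≤ L.getD j 0 := hm_min _ hjL
      have hle2 : L.getD j 0 ≤ m := by rw [h1', hG]; exact hGm
      omega
    rw [List.any_eq_true]
    refine ⟨((j : Int), ds[j]'(by omega)), ?_, ?_⟩
    · rw [PySem.List.mem_enumerate_iff]
      exact ⟨j, by omega, by simp⟩
    · simp only [Bool.and_eq_true, beq_iff_eq]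
      constructor
      · rw [← List.getD_eq_getElem ds 0 (by omega)]; exact hj1
      · rw [PySem.List.pyGetD_natCast, hLjm]
  · -- B returns True → A returns True
    intro hBt
    rw [List.any_eq_true] at hBt
    obtain ⟨p, hp, hpred⟩ := hBt
    rw [PySem.List.mem_enumerate_iff] at hp
    obtain ⟨k, hk, rfl⟩ := hp
    simp only [Bool.and_eq_true, beq_iff_eq] at hpred
    obtain ⟨hk1, hk2⟩ := hpred
    simp only [zero_add] at hk2
    rw [PySem.List.pyGetD_natCast] at hk2
    have hkc : k < cs.length := by omega
    have hgd1 : ds.getD k 0 = 1 := by rw [List.getD_eq_getElem ds 0 (by omega)]; exact hk1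
    have hm50 : m ≤ 50 := by
      rw [← hk2, hLk_eq k hkc, hgd1]
      exact pvLon_one_le ds h9 (k : Int) (by positivity)
    have hmG : m = L.foldl min 50 := by
      rcases pv_foldl_min_cases L 50 with hc | hc
      · omega
      · have := hm_min _ hc
        omega
    have hmem2 : L.getD k 0 ∈ r.2 := by
      apply h3 k hkc hgd1
      rw [hk2, hmG, ← hG]
      exact hglob k
    have hr2ne : r.2 ≠ [] := List.ne_nil_of_mem hmem2
    have hne : (r.2.length != 0) = true := by
      simp [List.length_eq_zero_iff, hr2ne]
    rw [if_pos hne]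
    have hSne : PySem.List.sorted r.2 (fun x => x) false ≠ [] := by
      rw [Ne, PySem.List.sorted_eq_nil_iff]; exact hr2ne
    obtain ⟨h0S, tS, hScons⟩ := List.exists_cons_of_ne_nil hSne
    have hh0mem : h0S ∈ r.2 := by
      rw [← PySem.List.mem_sorted r.2 (fun x => x) false, hScons]; exact List.mem_cons_self
    obtain ⟨j, hj, hj1, hj2⟩ := h2 h0S hh0mem
    have hjL : L.getD j 0 ∈ L := by rw [hL]; exact pvLons_getD_mem ds j (by omega)
    have hh0m : h0S = m := by
      have hle1 : m ≤ h0S := by rw [← hj2]; exact hm_min _ hjL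
      have hle2 : h0S ≤ L.getD k 0 :=
        PySem.List.key_head_sorted_le r.2 (fun x => x) hScons _ hmem2
      omega
    have hhead : (PySem.List.pyGetD (PySem.List.sorted r.2 (fun x => x) false) 0 0 == r.1) = true := by
      rw [hScons, PySem.List.pyGetD_zero_cons]
      rw [beq_iff_eq, hh0m, h1, hG, hmG]
    rw [if_pos hhead]

-- ===== VERDICT (by name: the statement is the Claim_ definition above) =====
theorem loneliest_spec : Claim_equal_loneliest := by
  intro number _ hpre
  unfold Spec_loneliest loneliest loneliest_alt
  exact pv_equiv _ (pv_toChars_digits number hpre)
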